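-- pv_equiv track=rewrite | github.com/mudassar266/XLUS-ViT | xai_vit_tiny_lime.py | pick_indices_per_class
-- ===== SOURCE A (Python) =====
-- from typing import List, Dict, Tuple
--
-- def pick_indices_per_class(
--     y_true: List[int],
--     y_pred: List[int],
--     num_classes: int,
--     k_correct: int,
--     k_incorrect: int
-- ) -> Dict[str, Dict[int, List[int]]]:
--     """Select up to K correct and K incorrect indices per TRUE class."""
--     correct_by_class = {c: [] for c in range(num_classes)}
--     incorrect_by_class = {c: [] for c in range(num_classes)}
--     for idx, (t, p) in enumerate(zip(y_true, y_pred)):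
--         if p == t:
--             correct_by_class[t].append(idx)
--         else:
--             incorrect_by_class[t].append(idx)
--     selected = {"correct": {}, "incorrect": {}}
--     for c in range(num_classes):
--         selected["correct"][c]   = correct_by_class[c][:k_correct]
--         selected["incorrect"][c] = incorrect_by_class[c][:k_incorrect]
--     return selected
-- ===== SOURCE B (Python) =====
-- def pick_indices_per_class(y_true, y_pred, num_classes, k_correct, k_incorrect):
--     pairs = list(enumerate(zip(y_true, y_pred)))
--     return {
--         "correct": {
--             c: [i for i, (t, p) in pairs if t == c and p == c][:k_correct]
--             for c in range(num_classes)
--         },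
--         "incorrect": {
--             c: [i for i, (t, p) in pairs if t == c and p != t][:k_incorrect]
--             for c in range(num_classes)
--         },
--     }
-- ===== Notes on version B (the rewrite author's own statement) =====
-- stated objective: idiomatic
-- what changed: Replaces A's single binning pass into two pre-initialised per-class dicts (followed by a slicing loop) with num_classes independent comprehension scans over enumerate(zip(y_true,y_pred)) that build each class's correct/incorrect index list directly; B never raises, so inputs whose true labels fall outside range(num_classes) (KeyError in A) are excluded by Pre_.
import Mathlib
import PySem

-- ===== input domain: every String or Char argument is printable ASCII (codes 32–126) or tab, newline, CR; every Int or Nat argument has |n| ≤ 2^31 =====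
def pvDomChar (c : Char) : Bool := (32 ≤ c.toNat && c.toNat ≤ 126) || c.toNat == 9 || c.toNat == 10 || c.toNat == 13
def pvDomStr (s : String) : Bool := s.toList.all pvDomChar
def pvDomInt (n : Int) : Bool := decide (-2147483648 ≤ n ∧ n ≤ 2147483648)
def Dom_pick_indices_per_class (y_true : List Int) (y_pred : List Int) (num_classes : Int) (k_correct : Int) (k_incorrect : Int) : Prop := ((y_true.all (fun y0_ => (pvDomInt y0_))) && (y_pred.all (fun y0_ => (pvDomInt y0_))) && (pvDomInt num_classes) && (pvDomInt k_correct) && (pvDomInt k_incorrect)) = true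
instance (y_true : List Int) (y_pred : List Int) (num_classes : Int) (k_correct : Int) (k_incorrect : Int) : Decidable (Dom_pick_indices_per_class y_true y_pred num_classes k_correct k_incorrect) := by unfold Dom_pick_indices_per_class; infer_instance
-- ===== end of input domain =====

-- B replaces A's single binning pass into pre-initialised per-class dicts with
-- num_classes independent comprehension scans over enumerate(zip(y_true, y_pred)) (idiomatic, not faster).

-- ===== PORT A =====
-- the loop body of A's single binning pass (state = the two dicts)
def pvStep (st : PySem.Dict Int (List Int) × PySem.Dict Int (List Int))
    (e : Int × Int × Int) : PySem.Dict Int (List Int) × PySem.Dict Int (List Int) :=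
  if e.2.2 == e.2.1 then (st.1.modify e.2.1 [] (· ++ [e.1]), st.2)
  else (st.1, st.2.modify e.2.1 [] (· ++ [e.1]))

def pick_indices_per_class (y_true : List Int) (y_pred : List Int) (num_classes : Int) (k_correct : Int) (k_incorrect : Int) : List (String × List (Int × List Int)) :=
  let correct_by_class : PySem.Dict Int (List Int) :=
    (PySem.List.pyRange 0 num_classes 1).foldl (fun d c => d.insert c []) PySem.Dict.empty
  let incorrect_by_class : PySem.Dict Int (List Int) :=
    (PySem.List.pyRange 0 num_classes 1).foldl (fun d c => d.insert c []) PySem.Dict.empty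
  let st := (PySem.List.enumerate (y_true.zip y_pred)).foldl pvStep
    (correct_by_class, incorrect_by_class)
  [("correct", (PySem.List.pyRange 0 num_classes 1).map
      (fun c => (c, PySem.List.slice (st.1.getD c []) none (some k_correct)))),
   ("incorrect", (PySem.List.pyRange 0 num_classes 1).map
      (fun c => (c, PySem.List.slice (st.2.getD c []) none (some k_incorrect))))]

-- ===== PORT B =====
def pick_indices_per_class_alt (y_true : List Int) (y_pred : List Int) (num_classes : Int) (k_correct : Int) (k_incorrect : Int) : List (String × List (Int × List Int)) :=
  let pairs := PySem.List.enumerate (y_true.zip y_pred)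
  [("correct", (PySem.List.pyRange 0 num_classes 1).map
      (fun c => (c, PySem.List.slice
        ((pairs.filter (fun e => e.2.1 == c && e.2.2 == c)).map (·.1)) none (some k_correct)))),
   ("incorrect", (PySem.List.pyRange 0 num_classes 1).map
      (fun c => (c, PySem.List.slice
        ((pairs.filter (fun e => e.2.1 == c && !(e.2.2 == e.2.1))).map (·.1)) none (some k_incorrect))))]

-- ===== PRECONDITION & SPEC =====
-- Pre_ excludes exactly the inputs where some true label in the zipped prefix lies
-- outside range(num_classes): there Python A raises KeyError (e.g. y_true=[2], y_pred=[0], num_classes=1).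
def Pre_pick_indices_per_class (y_true : List Int) (y_pred : List Int) (num_classes : Int) (k_correct : Int) (k_incorrect : Int) : Prop :=
  ∀ e ∈ y_true.zip y_pred, 0 ≤ e.1 ∧ e.1 ≤ num_classes - 1
instance (y_true : List Int) (y_pred : List Int) (num_classes : Int) (k_correct : Int) (k_incorrect : Int) : Decidable (Pre_pick_indices_per_class y_true y_pred num_classes k_correct k_incorrect) := by unfold Pre_pick_indices_per_class; infer_instance

def pvWitness_pick_indices_per_class : List Int × List Int × Int × Int × Int := ([0, 3, 2, 1], [0, 3, 2, 2], 4, 2, 3)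

def Spec_pick_indices_per_class (y_true : List Int) (y_pred : List Int) (num_classes : Int) (k_correct : Int) (k_incorrect : Int) (out : List (String × List (Int × List Int))) : Prop := out = pick_indices_per_class_alt y_true y_pred num_classes k_correct k_incorrect
instance (y_true : List Int) (y_pred : List Int) (num_classes : Int) (k_correct : Int) (k_incorrect : Int) (out : List (String × List (Int × List Int))) : Decidable (Spec_pick_indices_per_class y_true y_pred num_classes k_correct k_incorrect out) := by unfold Spec_pick_indices_per_class; infer_instance

-- ===== CLAIM (what is proved, stated in full; the proofs are below) =====
def Claim_equal_pick_indices_per_class : Prop := ∀ (y_true : List Int) (y_pred : List Int) (num_classes : Int) (k_correct : Int) (k_incorrect : Int), Dom_pick_indices_per_class y_true y_pred num_classes k_correct k_incorrect → Pre_pick_indices_per_class y_true y_pred num_classes k_correct k_incorrect → Spec_pick_indices_per_class y_true y_pred num_classes k_correct k_incorrect (pick_indices_per_class y_true y_pred num_classes k_correct k_incorrect)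

-- ===== LEMMAS AND PROOFS =====

-- the init loops {c: [] for c in range(n)} give every key the empty list (present or not)
lemma pv_init_getD (l : List Int) (d : PySem.Dict Int (List Int)) (c : Int)
    (h : d.getD c [] = []) :
    (l.foldl (fun d c => d.insert c []) d).getD c [] = [] := by
  induction l generalizing d with
  | nil => simpa using h
  | cons a l ih =>
    simp only [List.foldl_cons]
    apply ih
    by_cases hc : c = a
    · subst hc; simp [PySem.Dict.getD_insert_self]
    · rw [PySem.Dict.getD_insert_of_ne]; · exact h
      · exact hc

-- invariant of A's binning pass
lemma pv_fold_getD (l : List (Int × Int × Int))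
    (dc di : PySem.Dict Int (List Int)) (c : Int) :
    (l.foldl pvStep (dc, di)).1.getD c []
      = dc.getD c [] ++ (l.filter (fun e => e.2.2 == e.2.1 && e.2.1 == c)).map (·.1)
    ∧ (l.foldl pvStep (dc, di)).2.getD c []
      = di.getD c [] ++ (l.filter (fun e => !(e.2.2 == e.2.1) && e.2.1 == c)).map (·.1) := by
  induction l generalizing dc di with
  | nil => simp
  | cons e l ih =>
    by_cases h : e.2.2 = e.2.1
    · have hs : pvStep (dc, di) e = (dc.modify e.2.1 [] (· ++ [e.1]), di) := by
        simp [pvStep, h]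
      obtain ⟨h1, h2⟩ := ih (dc.modify e.2.1 [] (· ++ [e.1])) di
      rw [List.foldl_cons, hs]
      refine ⟨?_, ?_⟩
      · rw [h1, PySem.Dict.getD_modify]
        by_cases hc : e.2.1 = c
        · simp [List.filter_cons, h, hc, List.append_assoc]
        · simp [List.filter_cons, h, hc, Ne.symm hc]
      · rw [h2]
        simp [List.filter_cons, h]
    · have hs : pvStep (dc, di) e = (dc, di.modify e.2.1 [] (· ++ [e.1])) := by
        simp [pvStep, h]
      obtain ⟨h1, h2⟩ := ih dc (di.modify e.2.1 [] (· ++ [e.1]))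
      rw [List.foldl_cons, hs]
      refine ⟨?_, ?_⟩
      · rw [h1]
        simp [List.filter_cons, h]
      · rw [h2, PySem.Dict.getD_modify]
        by_cases hc : e.2.1 = c
        · have h' : ¬ e.2.2 = c := by rw [← hc]; exact h
          simp [List.filter_cons, h, h', hc, List.append_assoc]
        · simp [List.filter_cons, h, hc, Ne.symm hc]

-- A's and B's filter predicates agree pointwise
lemma pv_correct_filter (l : List (Int × Int × Int)) (c : Int) :
    l.filter (fun e => e.2.2 == e.2.1 && e.2.1 == c)
      = l.filter (fun e => e.2.1 == c && e.2.2 == c) := by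
  apply List.filter_congr
  intro e _
  by_cases hc : e.2.1 = c
  · subst hc; simp [Bool.and_comm]
  · have hb : (e.2.1 == c) = false := by simp [hc]
    simp [hb]

lemma pv_incorrect_filter (l : List (Int × Int × Int)) (c : Int) :
    l.filter (fun e => !(e.2.2 == e.2.1) && e.2.1 == c)
      = l.filter (fun e => e.2.1 == c && !(e.2.2 == e.2.1)) := by
  apply List.filter_congr
  intro e _
  exact Bool.and_comm _ _

-- ===== VERDICT (by name: the statement is the Claim_ definition above) =====
theorem pick_indices_per_class_spec : Claim_equal_pick_indices_per_class := by
  intro y_true y_pred num_classes k_correct k_incorrect _ _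
  simp only [Spec_pick_indices_per_class, pick_indices_per_class, pick_indices_per_class_alt]
  congr 2
  · apply List.map_congr_left
    intro c _
    obtain ⟨h1, _⟩ := pv_fold_getD (PySem.List.enumerate (y_true.zip y_pred))
        ((PySem.List.pyRange 0 num_classes 1).foldl (fun d c => d.insert c []) PySem.Dict.empty)
        ((PySem.List.pyRange 0 num_classes 1).foldl (fun d c => d.insert c []) PySem.Dict.empty) c
    rw [h1, pv_init_getD _ _ _ (by simp [PySem.Dict.getD, PySem.Dict.get?, PySem.Dict.empty]),
      pv_correct_filter]
    simp
  · congr 1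
    apply List.map_congr_left
    intro c _
    obtain ⟨_, h2⟩ := pv_fold_getD (PySem.List.enumerate (y_true.zip y_pred))
        ((PySem.List.pyRange 0 num_classes 1).foldl (fun d c => d.insert c []) PySem.Dict.empty)
        ((PySem.List.pyRange 0 num_classes 1).foldl (fun d c => d.insert c []) PySem.Dict.empty) c
    rw [h2, pv_init_getD _ _ _ (by simp [PySem.Dict.getD, PySem.Dict.get?, PySem.Dict.empty]),
      pv_incorrect_filter]
    simp
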